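-- pv_equiv track=rewrite | github.com/schlogl2017/Prokamers | sequence_utils.py | count_pyr_pur
-- ===== SOURCE A (Python) =====
-- def count_pyr_pur(sequence):
--     """
--     Function to count the number of pyrimidines (U, T, C) and
--     purines (A, G) in a sequence.
--
--     Inputs:
--         sequence - a string representing a sequence. It also
--                    could be a list/array of string characters, but
--                    this will be treated as a string.
--
--     Outputs:
--         bases - a dictionary-like object mapping the purines and
--                 pyrimidines to their counts.
--     EX:
--     >> count_pyr_pur('AAAGGGGGTT')
--     {'purines': 8, 'pyrimidines': 2}
--
--     >> count_pyr_pur('AAAGUGGUGGU')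
--     {'purines': 8, 'pyrimidines': 3}
--
--     >> count_pyr_pur('')
--     {'purines': 0, 'pyrimidines': 0}
--
--     >> count_pyr_pur('ActGccA')
--     {'purines': 3, 'pyrimidines': 4}
--
--     >> count_pyr_pur(['a', 'c', 'g', 'A'])
--     count_pyr_pur(['a', 'c', 'g', 'A'])
--
--     >> count_pyr_pur([])
--     {'purines': 0, 'pyrimidines': 0}
--     """
--     seq = ''
--     pur = 0
--     pyr = 0
--     check_list = isinstance(sequence, list)
--     if check_list:
--         seq += ''.join(sequence).upper()
--     else:
--         seq += sequence.upper()
--     for base in seq: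
--         if base in 'UTC':
--             pyr += 1
--         elif base in 'AG':
--             pur += 1
--     return {'purines': pur, 'pyrimidines': pyr}
-- ===== SOURCE B (Python) =====
-- def count_pyr_pur(sequence):
--     seq = ''.join(sequence).upper() if isinstance(sequence, list) else sequence.upper()
--     counts = {}
--     for base in seq:
--         counts[base] = counts.get(base, 0) + 1
--     pur = counts.get('A', 0) + counts.get('G', 0)
--     pyr = counts.get('U', 0) + counts.get('T', 0) + counts.get('C', 0)
--     return {'purines': pur, 'pyrimidines': pyr}
-- ===== Notes on version B (the rewrite author's own statement) =====
-- stated objective: alternative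
-- what changed: Replaces A's single classifying loop (two branch counters incremented per character) by first building a per-base frequency dictionary in one pass and then reading the five relevant base counts out of it.
import Mathlib
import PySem

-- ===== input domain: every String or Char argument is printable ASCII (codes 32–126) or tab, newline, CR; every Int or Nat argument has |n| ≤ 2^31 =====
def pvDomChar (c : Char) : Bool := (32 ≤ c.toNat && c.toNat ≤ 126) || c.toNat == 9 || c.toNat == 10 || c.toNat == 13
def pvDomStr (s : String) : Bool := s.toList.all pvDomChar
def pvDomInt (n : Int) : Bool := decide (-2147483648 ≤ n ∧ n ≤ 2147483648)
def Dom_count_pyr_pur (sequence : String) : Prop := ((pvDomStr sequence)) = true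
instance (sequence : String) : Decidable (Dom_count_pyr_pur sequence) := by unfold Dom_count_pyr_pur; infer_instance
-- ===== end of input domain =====

-- ===== PORT A =====
-- B builds a per-base frequency dictionary first and reads the five base counts from it,
-- instead of A's single classifying loop with two branch counters (objective: alternative).
-- literal port of A: seq = sequence.upper(); one pass, branch per character
def count_pyr_pur (sequence : String) : List (String × Int) :=
  let seq := PySem.Str.upper sequence
  let st := seq.toList.foldl (fun (acc : Int × Int) base =>
    if base ∈ ['U', 'T', 'C'] then (acc.1, acc.2 + 1)
    else if base ∈ ['A', 'G'] then (acc.1 + 1, acc.2)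
    else acc) (0, 0)
  [("purines", st.1), ("pyrimidines", st.2)]

-- ===== PORT B =====
-- literal port of B: build counts : Dict Char Int in one pass, then read out the five bases
def count_pyr_pur_alt (sequence : String) : List (String × Int) :=
  let seq := PySem.Str.upper sequence
  let counts := seq.toList.foldl
    (fun (d : PySem.Dict Char Int) base => d.insert base (d.getD base 0 + 1)) PySem.Dict.empty
  let pur := counts.getD 'A' 0 + counts.getD 'G' 0
  let pyr := counts.getD 'U' 0 + counts.getD 'T' 0 + counts.getD 'C' 0
  [("purines", pur), ("pyrimidines", pyr)]

-- ===== PRECONDITION & SPEC =====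
def Spec_count_pyr_pur (sequence : String) (out : List (String × Int)) : Prop := out = count_pyr_pur_alt sequence
instance (sequence : String) (out : List (String × Int)) : Decidable (Spec_count_pyr_pur sequence out) := by unfold Spec_count_pyr_pur; infer_instance

-- ===== CLAIM (what is proved, stated in full; the proofs are below) =====
def Claim_equal_count_pyr_pur : Prop := ∀ (sequence : String), Dom_count_pyr_pur sequence → Spec_count_pyr_pur sequence (count_pyr_pur sequence)

-- ===== LEMMAS AND PROOFS =====

-- A's pair-of-counters loop, characterised by per-letter counts of the traversed list
theorem countLoop_eq (l : List Char) (pur pyr : Int) :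
    l.foldl (fun (acc : Int × Int) base =>
      if base ∈ ['U', 'T', 'C'] then (acc.1, acc.2 + 1)
      else if base ∈ ['A', 'G'] then (acc.1 + 1, acc.2)
      else acc) (pur, pyr)
    = (pur + (l.count 'A' + l.count 'G' : Nat),
       pyr + (l.count 'U' + l.count 'T' + l.count 'C' : Nat)) := by
  induction l generalizing pur pyr with
  | nil => simp
  | cons c t ih =>
    simp only [List.foldl_cons, List.count_cons]
    by_cases hU : c ∈ ['U', 'T', 'C']
    · rw [if_pos hU, ih]
      fin_cases hU <;> simp <;> ring_nf
    · rw [if_neg hU]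
      by_cases hA : c ∈ ['A', 'G']
      · rw [if_pos hA, ih]
        fin_cases hA <;> simp <;> ring_nf
      · rw [ih]
        simp only [List.mem_cons, List.not_mem_nil] at hU hA
        push Not at hU hA
        have : ∀ v : Char, v ∈ (['U','T','C','A','G'] : List Char) → (c == v) = false := by
          intro v hv; fin_cases hv <;> simp_all
        simp [this 'U' (by simp), this 'T' (by simp), this 'C' (by simp),
              this 'A' (by simp), this 'G' (by simp), hA.1, hA.2.1]

-- ===== VERDICT (by name: the statement is the Claim_ definition above) =====
theorem count_pyr_pur_spec : Claim_equal_count_pyr_pur := by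
  intro s _
  unfold Spec_count_pyr_pur count_pyr_pur count_pyr_pur_alt
  simp only [countLoop_eq, PySem.Dict.getD_foldl_insert_add_one, PySem.Dict.getD_empty]
  push_cast
  simp [add_comm]
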